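-- pv_equiv track=rewrite | github.com/urlyy/cminify | minify.py | generate_short_name
-- ===== SOURCE A (Python) =====
-- def generate_short_name(index):
--     """Generate short variable names: a, b, ..., z, A, ..., Z, aa, ab, ..."""
--     chars = 'abcdefghijklmnopqrstuvwxyzABCDEFGHIJKLMNOPQRSTUVWXYZ'
--     base = len(chars)
--     name = ''
--     while True:
--         name = chars[index % base] + name
--         index //= base
--         if index == 0:
--             break
--         index -= 1
--     return name
-- ===== SOURCE B (Python) =====
-- def generate_short_name(index):
--     """Generate short variable names: a, b, ..., z, A, ..., Z, aa, ab, ..."""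
--     chars = 'abcdefghijklmnopqrstuvwxyzABCDEFGHIJKLMNOPQRSTUVWXYZ'
--     base = len(chars)
--     q, r = divmod(index, base)
--     if q == 0:
--         return chars[r]
--     return generate_short_name(q - 1) + chars[r]
-- ===== Notes on version B (the rewrite author's own statement) =====
-- stated objective: simpler
-- what changed: Replaces the while-loop that prepends digits into an accumulator with a direct recursion on the quotient (divmod, recurse on q-1, append the current digit), building the name most-significant digit first.
import Mathlib
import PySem

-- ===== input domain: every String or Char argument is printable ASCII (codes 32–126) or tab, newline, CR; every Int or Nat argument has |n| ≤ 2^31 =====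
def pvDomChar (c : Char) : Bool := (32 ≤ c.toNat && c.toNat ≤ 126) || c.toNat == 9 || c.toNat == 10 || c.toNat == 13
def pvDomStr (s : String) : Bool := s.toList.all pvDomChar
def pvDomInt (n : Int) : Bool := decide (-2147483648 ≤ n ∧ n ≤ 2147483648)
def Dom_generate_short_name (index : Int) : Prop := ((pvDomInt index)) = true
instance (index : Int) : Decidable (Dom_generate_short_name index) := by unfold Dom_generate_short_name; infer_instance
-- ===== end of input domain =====

-- B replaces A's while-loop prefix accumulation with a direct recursion on the quotient
-- (divmod, recurse on q-1, append the digit): simpler decomposition, same bijective base-52 value.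


-- ===== PORT A =====
def pvChars : List Char := "abcdefghijklmnopqrstuvwxyzABCDEFGHIJKLMNOPQRSTUVWXYZ".toList

-- A's 'while True' loop, as fuel recursion; inside Pre_ (0 ≤ index) fuel index.toNat + 1
-- is always sufficient (the quotient strictly decreases), so the port is exact there.
-- chars[index % 52]: 0 ≤ index % 52 < 52 always, so pyGetD is exact (no IndexError possible).
def pvALoop : Nat → Int → String → String
  | 0, _, name => name
  | fuel+1, index, name =>
    let name' := String.ofList [PySem.List.pyGetD pvChars (PySem.Int.mod index 52) 'a'] ++ name
    let index' := PySem.Int.floordiv index 52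
    if index' = 0 then name' else pvALoop fuel (index' - 1) name'

def generate_short_name (index : Int) : String := pvALoop (index.toNat + 1) index ""

-- ===== PORT B =====
-- Source B's recursion on the quotient, as fuel recursion (same fuel bound, exact inside Pre_).
def pvBRec : Nat → Int → String
  | 0, _ => ""
  | fuel+1, index =>
    let q := PySem.Int.floordiv index 52
    let r := PySem.Int.mod index 52
    let d := String.ofList [PySem.List.pyGetD pvChars r 'a']
    if q = 0 then d else pvBRec fuel (q - 1) ++ d

def generate_short_name_alt (index : Int) : String := pvBRec (index.toNat + 1) index

-- ===== PRECONDITION & SPEC =====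
-- Pre_ excludes negative index, on which Python A loops forever (never returns) and B recurses forever.
def Pre_generate_short_name (index : Int) : Prop := 0 ≤ index
instance (index : Int) : Decidable (Pre_generate_short_name index) := by unfold Pre_generate_short_name; infer_instance
def pvWitness_generate_short_name : Int := (2703)

def Spec_generate_short_name (index : Int) (out : String) : Prop := out = generate_short_name_alt index
instance (index : Int) (out : String) : Decidable (Spec_generate_short_name index out) := by unfold Spec_generate_short_name; infer_instance

-- ===== CLAIM (what is proved, stated in full; the proofs are below) =====
def Claim_equal_generate_short_name : Prop := ∀ (index : Int), Dom_generate_short_name index → Pre_generate_short_name index → Spec_generate_short_name index (generate_short_name index)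

-- ===== LEMMAS AND PROOFS =====

lemma pv_floordiv_natCast52 (n : Nat) :
    PySem.Int.floordiv (n : Int) 52 = ((n / 52 : Nat) : Int) := by
  exact_mod_cast PySem.Int.floordiv_natCast n 52

-- core: with enough fuel on both sides, the loop with accumulator equals the recursion ++ acc
lemma pv_loop_eq_rec (n : Nat) : ∀ (f₁ f₂ : Nat), n < f₁ → n < f₂ → ∀ acc : String,
    pvALoop f₁ (n : Int) acc = pvBRec f₂ (n : Int) ++ acc := by
  induction n using Nat.strong_induction_on with
  | _ n ih =>
    intro f₁ f₂ h₁ h₂ acc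
    obtain ⟨g₁, rfl⟩ : ∃ g, f₁ = g + 1 := ⟨f₁ - 1, by omega⟩
    obtain ⟨g₂, rfl⟩ : ∃ g, f₂ = g + 1 := ⟨f₂ - 1, by omega⟩
    simp only [pvALoop, pvBRec, pv_floordiv_natCast52]
    by_cases hq : n / 52 = 0
    · simp [hq]
    · have hq' : ¬ ((n / 52 : Nat) : Int) = 0 := by exact_mod_cast hq
      simp only [hq', if_false]
      have hm : ((n / 52 : Nat) : Int) - 1 = ((n / 52 - 1 : Nat) : Int) := by
        have : 1 ≤ n / 52 := Nat.one_le_iff_ne_zero.mpr hq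
        push_cast [this]; ring
      have hlt : n / 52 - 1 < n := by
        have h52 : 52 ≤ n := by
          by_contra h
          exact hq (Nat.div_eq_of_lt (by omega))
        have := Nat.div_le_self n 52
        have : n / 52 < n := Nat.div_lt_self (by omega) (by omega)
        omega
      rw [hm, ih _ hlt g₁ g₂ (by omega) (by omega)]
      rw [String.append_assoc]

-- ===== VERDICT (by name: the statement is the Claim_ definition above) =====
theorem generate_short_name_spec : Claim_equal_generate_short_name := by
  intro index _ hpre
  unfold Spec_generate_short_name generate_short_name generate_short_name_alt
  obtain ⟨n, rfl⟩ : ∃ n : Nat, index = (n : Int) := ⟨index.toNat, (Int.toNat_of_nonneg hpre).symm⟩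
  rw [Int.toNat_natCast]
  rw [pv_loop_eq_rec n (n + 1) (n + 1) (by omega) (by omega) ""]
  simp
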